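-- pv_equiv track=rewrite | github.com/keagxn/CP104 | CP104/Labs/mcka4090_l8/src/functions.py | list_categorize
-- ===== SOURCE A (Python) =====
-- def list_categorize(values):
--     """
--     -------------------------------------------------------
--     Returns data about the categories of values in a list.
--     Use: negatives, positives, zeroes, evens, odds = list_categorize(values)
--     -------------------------------------------------------
--     Parameters:
--         values - a list of values (list of int)
--     Returns:
--         negatives - the number of negative values (int)
--         positives - the number of positive values (int)
--         zeroes - the number of zeroes (int)
--         evens - the number of even values (int)
--         odds - the number of odd values (int)
--     -------------------------------------------------------
--     """
--     values.sort()
--     positives = 0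
--     negatives = 0
--     evens = 0
--     odds = 0
--     zeros = 0
--
--     for num in values:
--
--         if num > 0:
--             positives = positives + 1
--
--             if num % 2 == 0:
--
--                 evens = evens + 1
--
--             else:
--
--                 odds = odds + 1
--
--         elif num == 0:
--
--             zeros = zeros + 1
--             evens = evens + 1
--
--         else:
--
--             negatives = negatives + 1
--
--             if num % 2 == 0:
--
--                 evens = evens + 1
--
--             else:
--
--                 odds = odds + 1
--
--     return negatives, positives, zeros, evens, odds
-- ===== SOURCE B (Python) =====
-- def list_categorize(values):
--     values.sort()  # kept for A's in-place mutation side effect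
--     negatives = sum(1 for n in values if n < 0)
--     positives = sum(1 for n in values if n > 0)
--     zeros = sum(1 for n in values if n == 0)
--     evens = sum(1 for n in values if n % 2 == 0)
--     odds = sum(1 for n in values if n % 2 != 0)
--     return negatives, positives, zeros, evens, odds
-- ===== Notes on version B (the rewrite author's own statement) =====
-- stated objective: simpler
-- what changed: Replaces the single branching accumulator loop (nested even/odd tests inside sign branches) with five independent counting passes, one per returned category.
import Mathlib
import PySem

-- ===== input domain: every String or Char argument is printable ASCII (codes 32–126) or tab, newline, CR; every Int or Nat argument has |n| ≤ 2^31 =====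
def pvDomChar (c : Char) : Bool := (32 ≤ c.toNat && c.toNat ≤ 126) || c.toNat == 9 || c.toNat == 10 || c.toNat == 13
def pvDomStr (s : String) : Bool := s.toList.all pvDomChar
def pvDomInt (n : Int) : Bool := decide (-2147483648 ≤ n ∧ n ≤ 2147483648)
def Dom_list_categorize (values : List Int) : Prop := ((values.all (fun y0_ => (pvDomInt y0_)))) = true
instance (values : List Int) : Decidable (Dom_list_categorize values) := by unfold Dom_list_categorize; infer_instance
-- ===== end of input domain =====

-- B replaces A's single branching accumulator loop with five independent counting
-- passes (one per category) after the same in-place sort; note both A and B sort the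
-- argument list in place (same side effect), and the equivalence proved is about the return value.


-- ===== PORT A =====
-- A: sort, then one loop carrying (positives, negatives, evens, odds, zeros),
-- branching on sign with the parity test nested inside each sign branch.
def list_categorize (values : List Int) : Int × Int × Int × Int × Int :=
  let sorted := PySem.List.sorted values (fun x => x) false
  let st := sorted.foldl
    (fun (acc : Int × Int × Int × Int × Int) num =>
      if num > 0 then
        if PySem.Int.mod num 2 == 0 then
          (acc.1 + 1, acc.2.1, acc.2.2.1 + 1, acc.2.2.2.1, acc.2.2.2.2)
        else
          (acc.1 + 1, acc.2.1, acc.2.2.1, acc.2.2.2.1 + 1, acc.2.2.2.2)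
      else if num == 0 then
        (acc.1, acc.2.1, acc.2.2.1 + 1, acc.2.2.2.1, acc.2.2.2.2 + 1)
      else
        if PySem.Int.mod num 2 == 0 then
          (acc.1, acc.2.1 + 1, acc.2.2.1 + 1, acc.2.2.2.1, acc.2.2.2.2)
        else
          (acc.1, acc.2.1 + 1, acc.2.2.1, acc.2.2.2.1 + 1, acc.2.2.2.2))
    (0, 0, 0, 0, 0)
  (st.2.1, st.1, st.2.2.2.2, st.2.2.1, st.2.2.2.1)

-- ===== PORT B =====
-- B: sort (same side effect), then five independent counting passes.
def list_categorize_alt (values : List Int) : Int × Int × Int × Int × Int :=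
  let s := PySem.List.sorted values (fun x => x) false
  ((s.countP (fun n => decide (n < 0)) : Int),
   (s.countP (fun n => decide (n > 0)) : Int),
   (s.countP (fun n => decide (n = 0)) : Int),
   (s.countP (fun n => PySem.Int.mod n 2 == 0) : Int),
   (s.countP (fun n => PySem.Int.mod n 2 != 0) : Int))

-- ===== PRECONDITION & SPEC =====
def Spec_list_categorize (values : List Int) (out : Int × Int × Int × Int × Int) : Prop := out = list_categorize_alt values
instance (values : List Int) (out : Int × Int × Int × Int × Int) : Decidable (Spec_list_categorize values out) := by unfold Spec_list_categorize; infer_instance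

-- ===== CLAIM (what is proved, stated in full; the proofs are below) =====
def Claim_equal_list_categorize : Prop := ∀ (values : List Int), Dom_list_categorize values → Spec_list_categorize values (list_categorize values)

-- ===== LEMMAS AND PROOFS =====

-- A's loop over any list, from any start state, adds the five category counts.
theorem list_categorize_fold (l : List Int) (p n e o z : Int) :
    l.foldl
      (fun (acc : Int × Int × Int × Int × Int) num =>
        if num > 0 then
          if PySem.Int.mod num 2 == 0 then
            (acc.1 + 1, acc.2.1, acc.2.2.1 + 1, acc.2.2.2.1, acc.2.2.2.2)
          else
            (acc.1 + 1, acc.2.1, acc.2.2.1, acc.2.2.2.1 + 1, acc.2.2.2.2)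
        else if num == 0 then
          (acc.1, acc.2.1, acc.2.2.1 + 1, acc.2.2.2.1, acc.2.2.2.2 + 1)
        else
          if PySem.Int.mod num 2 == 0 then
            (acc.1, acc.2.1 + 1, acc.2.2.1 + 1, acc.2.2.2.1, acc.2.2.2.2)
          else
            (acc.1, acc.2.1 + 1, acc.2.2.1, acc.2.2.2.1 + 1, acc.2.2.2.2))
      (p, n, e, o, z)
    = (p + (l.countP (fun x => decide (x > 0)) : Int),
       n + (l.countP (fun x => decide (x < 0)) : Int),
       e + (l.countP (fun x => PySem.Int.mod x 2 == 0) : Int),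
       o + (l.countP (fun x => PySem.Int.mod x 2 != 0) : Int),
       z + (l.countP (fun x => decide (x = 0)) : Int)) := by
  induction l generalizing p n e o z with
  | nil => simp only [List.foldl_nil, List.countP_nil, Nat.cast_zero, add_zero]
  | cons a t ih =>
    rw [List.foldl_cons]
    dsimp only
    by_cases hpos : a > 0
    · have hz : (a == 0) = false := by simp; omega
      have hneg : (decide (a < 0)) = false := by simp; omega
      have hzd : (decide (a = 0)) = false := by simp; omega
      by_cases hev : (PySem.Int.mod a 2 == 0) = true
      · rw [if_pos hpos, if_pos hev, ih]
        simp only [List.countP_cons, hpos, hzd, hneg, hev, decide_true, bne,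
          Bool.not_true, if_true, Prod.mk.injEq]
        refine ⟨by push_cast; ring, by push_cast; ring, by push_cast; ring, rfl, rfl⟩
      · have hev' : (PySem.Int.mod a 2 == 0) = false := by
          cases h : (PySem.Int.mod a 2 == 0) <;> simp_all
        rw [if_pos hpos, if_neg hev, ih]
        simp only [List.countP_cons, hpos, hzd, hneg, hev', decide_true, bne,
          Bool.not_false, if_true, Prod.mk.injEq]
        refine ⟨by push_cast; ring, by push_cast; ring, rfl, by push_cast; ring, rfl⟩
    · by_cases hz : a = 0
      · subst hz
        rw [if_neg hpos, if_pos (by decide : (((0:Int) == 0) = true)), ih]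
        have h1 : (decide ((0:Int) > 0)) = false := by decide
        have h4 : (PySem.Int.mod (0:Int) 2 == 0) = true := by decide
        simp only [List.countP_cons, h1, h4, bne, Bool.not_true, decide_true, if_true,
          Prod.mk.injEq]
        refine ⟨rfl, rfl, by push_cast; ring, rfl, by push_cast; ring⟩
      · have hzb : (a == 0) = false := by simp [hz]
        have hneg : (decide (a < 0)) = true := by simp; omega
        have hposb : (decide (a > 0)) = false := by simp; omega
        by_cases hev : (PySem.Int.mod a 2 == 0) = true
        · rw [if_neg hpos, if_neg (by simp [hzb]), if_pos hev, ih]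
          simp only [List.countP_cons, hneg, hposb, hev, hz, bne,
            Bool.not_true, if_true, decide_false, Prod.mk.injEq]
          refine ⟨rfl, by push_cast; ring, by push_cast; ring, rfl, rfl⟩
        · have hev' : (PySem.Int.mod a 2 == 0) = false := by
            cases h : (PySem.Int.mod a 2 == 0) <;> simp_all
          rw [if_neg hpos, if_neg (by simp [hzb]), if_neg hev, ih]
          simp only [List.countP_cons, hneg, hposb, hev', hz, bne,
            Bool.not_false, if_true, decide_false, Prod.mk.injEq]
          refine ⟨rfl, by push_cast; ring, rfl, by push_cast; ring, rfl⟩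

-- ===== VERDICT (by name: the statement is the Claim_ definition above) =====
theorem list_categorize_spec : Claim_equal_list_categorize := by
  intro values _
  unfold Spec_list_categorize list_categorize list_categorize_alt
  dsimp only
  rw [list_categorize_fold]
  simp only [zero_add]
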